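-- pv_equiv track=rewrite | github.com/MateErdei/esg.linuxep.linux-mono-repo | base/modules/mcsrouter/mcsrouter/adapters/agent_adapter.py | is_string_xml_valid
-- ===== SOURCE A (Python) =====
-- def is_string_xml_valid(string: str):
--     # Empty is invalid
--     if string == '':
--         return False
--     # These characters are invalid and would break XML: <, &, >, ', "
--     invalid_chars = ['<', '&', '>', "'", '"']
--     for invalid_char in invalid_chars:
--         if invalid_char in string:
--             return False
--     return True
-- ===== SOURCE B (Python) =====
-- _INVALID = set('<&>\'"')
--
-- def is_string_xml_valid(string: str):
--     # Empty is invalid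
--     if string == '':
--         return False
--     # One pass over the string's own characters
--     return not any(c in _INVALID for c in string)
-- ===== Notes on version B (the rewrite author's own statement) =====
-- stated objective: simpler
-- what changed: Instead of five substring scans of the input (one per invalid character), B makes a single pass over the string's characters testing each against a set built once.
import Mathlib
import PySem

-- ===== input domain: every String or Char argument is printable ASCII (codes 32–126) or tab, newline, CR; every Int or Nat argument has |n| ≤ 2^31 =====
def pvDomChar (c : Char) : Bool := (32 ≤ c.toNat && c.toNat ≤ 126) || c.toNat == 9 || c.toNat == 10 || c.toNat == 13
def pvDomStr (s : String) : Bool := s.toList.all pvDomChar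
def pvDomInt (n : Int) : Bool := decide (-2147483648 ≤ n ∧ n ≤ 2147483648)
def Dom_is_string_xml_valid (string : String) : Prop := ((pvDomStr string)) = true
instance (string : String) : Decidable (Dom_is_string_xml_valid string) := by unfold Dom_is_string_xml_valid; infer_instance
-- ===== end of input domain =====

-- B replaces A's five substring scans of the input by a single pass over the
-- string's own characters against a set of the five invalid characters (simpler).

-- ===== PORT A =====
-- the 'for invalid_char in invalid_chars: if invalid_char in string: return False' loop
def pvALoop (invalid_chars : List String) (string : String) : Bool :=
  match invalid_chars with
  | [] => true
  | c :: rest => if PySem.Str.isIn c string then false else pvALoop rest string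

def is_string_xml_valid (string : String) : Bool :=
  if string == "" then false
  else pvALoop ["<", "&", ">", "'", "\""] string

-- ===== PORT B =====
def pvInvalidSet : PySem.Set Char := PySem.Set.ofList ['<', '&', '>', '\'', '"']

def is_string_xml_valid_alt (string : String) : Bool :=
  if string == "" then false
  else !(string.toList.any (fun c => PySem.Set.contains pvInvalidSet c))

-- ===== PRECONDITION & SPEC =====
def Spec_is_string_xml_valid (string : String) (out : Bool) : Prop := out = is_string_xml_valid_alt string
instance (string : String) (out : Bool) : Decidable (Spec_is_string_xml_valid string out) := by unfold Spec_is_string_xml_valid; infer_instance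

-- ===== CLAIM (what is proved, stated in full; the proofs are below) =====
def Claim_equal_is_string_xml_valid : Prop := ∀ (string : String), Dom_is_string_xml_valid string → Spec_is_string_xml_valid string (is_string_xml_valid string)

-- ===== LEMMAS AND PROOFS =====

-- 'c in s' for a one-character string is character membership
theorem pv_isIn_singleton (c : Char) (s : String) :
    PySem.Str.isIn (String.ofList [c]) s = s.toList.contains c := by
  rw [Bool.eq_iff_iff, PySem.Str.isIn_iff_infix, List.contains_iff_mem]
  simp only [String.toList_ofList]
  constructor
  · intro h
    exact (List.singleton_sublist).1 h.sublist
  · intro h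
    obtain ⟨l₁, l₂, he⟩ := List.append_of_mem h
    exact ⟨l₁, l₂, by rw [he]; simp⟩

theorem pv_main (s : String) :
    is_string_xml_valid s = is_string_xml_valid_alt s := by
  unfold is_string_xml_valid is_string_xml_valid_alt
  by_cases h : s == ""
  · simp [h]
  · simp only [h, Bool.false_eq_true, if_false]
    have e1 := pv_isIn_singleton '<' s
    have e2 := pv_isIn_singleton '&' s
    have e3 := pv_isIn_singleton '>' s
    have e4 := pv_isIn_singleton '\'' s
    have e5 := pv_isIn_singleton '"' s
    simp only [pvALoop]
    rw [show ("<" : String) = String.ofList ['<'] from rfl,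
        show ("&" : String) = String.ofList ['&'] from rfl,
        show (">" : String) = String.ofList ['>'] from rfl,
        show ("'" : String) = String.ofList ['\''] from rfl,
        show ("\"" : String) = String.ofList ['"'] from rfl,
        e1, e2, e3, e4, e5]
    rw [Bool.eq_iff_iff]
    simp [pvInvalidSet, PySem.Set.contains, PySem.Set.ofList]
    constructor
    · rintro ⟨h1, h2, h3, h4, h5⟩ c hc
      refine ⟨?_, ?_, ?_, ?_, ?_⟩ <;> (rintro rfl <;> contradiction)
    · intro h
      refine ⟨?_, ?_, ?_, ?_, ?_⟩ <;> (intro hm; have := h _ hm; tauto)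

-- ===== VERDICT (by name: the statement is the Claim_ definition above) =====
theorem is_string_xml_valid_spec : Claim_equal_is_string_xml_valid := by
  intro s _
  unfold Spec_is_string_xml_valid
  exact pv_main s
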